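-- pv_equiv track=rewrite | github.com/Bergschaf/BWINF_2024_Runde_2 | Aufgabe_1/Aufgabe_1.py | lt_sig
-- ===== SOURCE A (Python) =====
-- def lt_sig(sig1, sig2):
--     sig1 = [sum(sig1[:i + 1]) for i in range(len(sig1))]
--     sig2 = [sum(sig2[:i + 1]) for i in range(len(sig2))]
--     for i in range(len(sig1)):
--         if sig1[i] < sig2[i]:
--             return True
--         if sig1[i] > sig2[i]:
--             return False
--     return False
-- ===== SOURCE B (Python) =====
-- def lt_sig(sig1, sig2):
--     a = 0
--     b = 0
--     for x, y in zip(sig1, sig2):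
--         a += x
--         b += y
--         if a != b:
--             return a < b
--     return False
-- ===== Notes on version B (the rewrite author's own statement) =====
-- stated objective: faster
-- what changed: B replaces A's quadratic rebuild of both prefix-sum lists (sum over a fresh slice per index) followed by an index-compare loop with a single pass that maintains two running accumulators and compares them incrementally.
import Mathlib
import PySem

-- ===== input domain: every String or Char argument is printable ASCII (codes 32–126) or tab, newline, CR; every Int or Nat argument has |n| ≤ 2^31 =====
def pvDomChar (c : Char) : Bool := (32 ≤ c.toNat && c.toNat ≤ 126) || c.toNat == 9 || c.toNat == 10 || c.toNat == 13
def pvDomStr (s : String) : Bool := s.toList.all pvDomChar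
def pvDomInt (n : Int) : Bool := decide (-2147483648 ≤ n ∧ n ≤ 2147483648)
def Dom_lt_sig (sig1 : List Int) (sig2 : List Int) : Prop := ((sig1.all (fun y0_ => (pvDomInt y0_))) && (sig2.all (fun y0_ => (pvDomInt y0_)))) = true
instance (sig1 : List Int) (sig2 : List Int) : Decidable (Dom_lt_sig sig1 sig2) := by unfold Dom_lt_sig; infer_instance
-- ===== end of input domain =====

-- B replaces A's quadratic prefix-sum rebuild (a fresh slice summed per index) with one
-- pass keeping two running accumulators compared incrementally; equivalence is for the
-- return value on inputs where A returns (len sig1 ≤ len sig2).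

-- ===== PORT A =====
-- sig1 = [sum(sig1[:i+1]) for i in range(len(sig1))]
def prefListA (xs : List Int) : List Int :=
  (List.range xs.length).map (fun i => (PySem.List.slice xs none (some ((i : Int) + 1))).sum)

-- for i in range(len(l1)): compare l1[i] with l2[i], walking both lists in step.
-- The second pattern (l2 exhausted first) is Python's IndexError; excluded by Pre_.
def cmpLoopA : List Int → List Int → Bool
  | [], _ => false
  | _ :: _, [] => false
  | x :: xs, y :: ys =>
      if x < y then true
      else if x > y then false
      else cmpLoopA xs ys

def lt_sig (sig1 : List Int) (sig2 : List Int) : Bool :=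
  cmpLoopA (prefListA sig1) (prefListA sig2)

-- ===== PORT B =====
-- for x, y in zip(sig1, sig2): a += x; b += y; if a != b: return a < b
def zipLoopB : Int → Int → List Int → List Int → Bool
  | a, b, x :: xs, y :: ys =>
      let a' := a + x
      let b' := b + y
      if a' ≠ b' then decide (a' < b') else zipLoopB a' b' xs ys
  | _, _, _, _ => false

def lt_sig_alt (sig1 : List Int) (sig2 : List Int) : Bool :=
  zipLoopB 0 0 sig1 sig2

-- ===== PRECONDITION & SPEC =====
-- Pre_ excludes exactly the inputs where A raises IndexError: sig1 longer than sig2 AND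
-- the prefix sums agree on every position sig2 covers (otherwise A returns early).
def Pre_lt_sig (sig1 : List Int) (sig2 : List Int) : Prop :=
  sig1.length ≤ sig2.length ∨
    ∃ i < sig2.length, ((sig1.take (i + 1)).sum : Int) ≠ (sig2.take (i + 1)).sum
instance (sig1 : List Int) (sig2 : List Int) : Decidable (Pre_lt_sig sig1 sig2) := by
  unfold Pre_lt_sig; infer_instance

def pvWitness_lt_sig : List Int × List Int := ([3, -1, 2], [3, 0, 2])

def Spec_lt_sig (sig1 : List Int) (sig2 : List Int) (out : Bool) : Prop := out = lt_sig_alt sig1 sig2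
instance (sig1 : List Int) (sig2 : List Int) (out : Bool) : Decidable (Spec_lt_sig sig1 sig2 out) := by
  unfold Spec_lt_sig; infer_instance

-- ===== CLAIM (what is proved, stated in full; the proofs are below) =====
def Claim_equal_lt_sig : Prop := ∀ (sig1 : List Int) (sig2 : List Int), Dom_lt_sig sig1 sig2 → Pre_lt_sig sig1 sig2 → Spec_lt_sig sig1 sig2 (lt_sig sig1 sig2)

-- ===== LEMMAS AND PROOFS =====

-- running prefix sums starting from accumulator a
def prefFrom (a : Int) : List Int → List Int
  | [] => []
  | x :: xs => (a + x) :: prefFrom (a + x) xs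

theorem map_take_sum_eq_prefFrom (xs : List Int) (a : Int) :
    (List.range xs.length).map (fun i => a + (xs.take (i + 1)).sum) = prefFrom a xs := by
  induction xs generalizing a with
  | nil => simp [prefFrom]
  | cons x xs ih =>
      simp only [List.length_cons, List.range_succ_eq_map, List.map_cons, List.map_map,
        prefFrom]
      congr 1
      · simp
      · rw [← ih (a + x)]
        apply List.map_congr_left
        intro i _
        simp [List.take_succ_cons, add_assoc]

theorem prefListA_eq (xs : List Int) : prefListA xs = prefFrom 0 xs := by
  unfold prefListA
  rw [← map_take_sum_eq_prefFrom xs 0]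
  simp only [bind_pure_comp, List.map_eq_map, List.map_map]
  apply List.map_congr_left
  intro i _
  simp only [Function.comp_apply]
  have h : ((i : Int) + 1) = ((i + 1 : Nat) : Int) := by push_cast; ring
  rw [h, PySem.List.slice_to_natCast]
  simp

theorem cmpLoopA_prefFrom (s1 : List Int) :
    ∀ (s2 : List Int) (a b : Int),
      (s1.length ≤ s2.length ∨
        ∃ i < s2.length, a + (s1.take (i + 1)).sum ≠ b + (s2.take (i + 1)).sum) →
      cmpLoopA (prefFrom a s1) (prefFrom b s2) = zipLoopB a b s1 s2 := by
  induction s1 with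
  | nil => intro s2 a b _; cases s2 <;> simp [prefFrom, cmpLoopA, zipLoopB]
  | cons x xs ih =>
      intro s2 a b hpre
      cases s2 with
      | nil =>
          rcases hpre with hlen | ⟨i, hi, _⟩
          · simp at hlen
          · simp at hi
      | cons y ys =>
          simp only [prefFrom, cmpLoopA, zipLoopB]
          by_cases h1 : a + x < b + y
          · simp [h1, show a + x ≠ b + y from by omega]
          · by_cases h2 : a + x > b + y
            · simp [h1, h2, show a + x ≠ b + y from by omega]
            · have heq : a + x = b + y := by omega
              have htail : xs.length ≤ ys.length ∨
                  ∃ i < ys.length,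
                    (b + y) + (xs.take (i + 1)).sum ≠ (b + y) + (ys.take (i + 1)).sum := by
                rcases hpre with hlen | ⟨i, hi, hne⟩
                · left; simpa using hlen
                · cases i with
                  | zero => exact absurd heq (by simpa using hne)
                  | succ j =>
                      right
                      refine ⟨j, by simpa using hi, ?_⟩
                      simp only [List.take_succ_cons, List.sum_cons] at hne
                      intro h; apply hne; omega
              simp only [heq]
              rw [if_neg (by omega : ¬ b + y < b + y), if_neg (by omega : ¬ b + y > b + y),
                if_neg (by simp : ¬ b + y ≠ b + y)]
              exact ih ys (b + y) (b + y) htail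

-- ===== VERDICT (by name: the statement is the Claim_ definition above) =====
theorem lt_sig_spec : Claim_equal_lt_sig := by
  intro sig1 sig2 _ hpre
  unfold Spec_lt_sig lt_sig lt_sig_alt
  rw [prefListA_eq, prefListA_eq]
  apply cmpLoopA_prefFrom sig1 sig2 0 0
  unfold Pre_lt_sig at hpre
  simpa using hpre
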